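-- pv_equiv track=rewrite | github.com/Keshtel/phd-thesis-code | Plotting/Functions/AllFunctions.py | find_stretches
-- ===== SOURCE A (Python) =====
-- def find_stretches(valid_indices):
--     stretches = []
--     start = None
--     for i, valid in enumerate(valid_indices):
--         if valid and start is None:
--             start = i
--         elif not valid and start is not None:
--             stretches.append((start, i))
--             start = None
--     if start is not None:
--         stretches.append((start, len(valid_indices)))
--     return stretches
-- ===== SOURCE B (Python) =====
-- from itertools import groupby
--
-- def find_stretches(valid_indices):
--     stretches = []
--     idx = 0
--     for is_valid, group in groupby(valid_indices, key=bool):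
--         length = sum(1 for _ in group)
--         if is_valid:
--             stretches.append((idx, idx + length))
--         idx += length
--     return stretches
-- ===== Notes on version B (the rewrite author's own statement) =====
-- stated objective: idiomatic
-- what changed: Replaces the start/None toggle state machine with itertools.groupby run-grouping: each maximal run of equal truth values is consumed at once and a running offset tracks positions.
import Mathlib
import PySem

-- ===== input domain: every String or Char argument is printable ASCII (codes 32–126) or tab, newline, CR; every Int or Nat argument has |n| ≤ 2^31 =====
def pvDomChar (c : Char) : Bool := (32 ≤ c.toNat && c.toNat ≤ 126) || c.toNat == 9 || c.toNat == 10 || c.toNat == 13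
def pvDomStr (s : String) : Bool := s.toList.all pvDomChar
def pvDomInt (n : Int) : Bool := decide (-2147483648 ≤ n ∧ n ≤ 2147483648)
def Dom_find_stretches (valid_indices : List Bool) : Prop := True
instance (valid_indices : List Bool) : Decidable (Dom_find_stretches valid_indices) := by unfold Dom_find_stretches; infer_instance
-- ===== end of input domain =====

-- B replaces A's start/None toggle state machine with run-grouping (itertools.groupby) over
-- maximal runs of equal truth values, keeping a running offset; objective: more idiomatic.


-- ===== PORT A =====
-- fold state: (stretches so far, optional open start); branches in the source order
def pvStepA (st : List (Int × Int) × Option Int) (p : Int × Bool) : List (Int × Int) × Option Int :=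
  match st.2, p.2 with
  | none, true => (st.1, some p.1)                       -- if valid and start is None
  | some s, false => (st.1 ++ [(s, p.1)], none)          -- elif not valid and start is not None
  | _, _ => st

def find_stretches (valid_indices : List Bool) : List (Int × Int) :=
  let st := (PySem.List.enumerate valid_indices).foldl pvStepA ([], none)
  match st.2 with
  | some s => st.1 ++ [(s, (valid_indices.length : Int))]
  | none => st.1

-- ===== PORT B =====
-- run-grouping (groupby): consume a maximal run of equal values at once, advance the offset
def pvRuns : List Bool → Int → List (Int × Int)
  | [], _ => []
  | b :: rest, idx =>
    let len : Int := 1 + (rest.takeWhile (· == b)).length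
    let tail := rest.dropWhile (· == b)
    let res := pvRuns tail (idx + len)
    if b then (idx, idx + len) :: res else res
termination_by xs _ => xs.length
decreasing_by
  have := List.length_dropWhile_le (p := (· == b)) (l := rest)
  simp only [List.length_cons]
  omega

def find_stretches_alt (valid_indices : List Bool) : List (Int × Int) :=
  pvRuns valid_indices 0

-- ===== PRECONDITION & SPEC =====
def Spec_find_stretches (valid_indices : List Bool) (out : List (Int × Int)) : Prop := out = find_stretches_alt valid_indices
instance (valid_indices : List Bool) (out : List (Int × Int)) : Decidable (Spec_find_stretches valid_indices out) := by unfold Spec_find_stretches; infer_instance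

-- ===== CLAIM (what is proved, stated in full; the proofs are below) =====
def Claim_equal_find_stretches : Prop := ∀ (valid_indices : List Bool), Dom_find_stretches valid_indices → Spec_find_stretches valid_indices (find_stretches valid_indices)

-- ===== LEMMAS AND PROOFS =====

-- unfolding lemma for B's run-grouping recursion
lemma pvRuns_cons (b : Bool) (rest : List Bool) (i : Int) :
    pvRuns (b :: rest) i =
      (if b then [(i, i + (1 + ((rest.takeWhile (· == b)).length : Int)))] else []) ++
        pvRuns (rest.dropWhile (· == b)) (i + (1 + ((rest.takeWhile (· == b)).length : Int))) := by
  rw [pvRuns]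
  cases b <;> simp

-- a leading invalid element is just skipped (the false-run shrinks by one)
lemma pvRuns_false (rest : List Bool) (i : Int) :
    pvRuns (false :: rest) i = pvRuns rest (i + 1) := by
  cases rest with
  | nil => simp [pvRuns]
  | cons b r =>
    cases b with
    | false =>
      rw [pvRuns_cons, pvRuns_cons]
      simp only [List.takeWhile, List.dropWhile]
      norm_num
      congr 1

      ring
    | true =>
      rw [pvRuns_cons]
      simp [List.takeWhile, List.dropWhile]

-- A's trailing flush, as a function of the total length
def pvFinish (n : Int) (st : List (Int × Int) × Option Int) : List (Int × Int) :=
  match st.2 with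
  | some s => st.1 ++ [(s, n)]
  | none => st.1

-- B's meaning of A's fold state: either between runs, or inside a run opened at position s
def pvCont : Option Int → List Bool → Int → List (Int × Int)
  | none, vs, i => pvRuns vs i
  | some s, vs, i =>
    let len : Int := ((vs.takeWhile (· == true)).length : Int)
    (s, i + len) :: pvRuns (vs.dropWhile (· == true)) (i + len)

-- the loop invariant: folding A's step from any state computes B's continuation
lemma pvMain (vs : List Bool) (i : Int) (acc : List (Int × Int)) (s : Option Int) :
    pvFinish (i + (vs.length : Int)) ((PySem.List.enumerate vs i).foldl pvStepA (acc, s))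
      = acc ++ pvCont s vs i := by
  induction vs generalizing i acc s with
  | nil => cases s <;> simp [PySem.List.enumerate, pvFinish, pvCont, pvRuns]
  | cons b rest ih =>
    rw [PySem.List.enumerate_cons]
    simp only [List.foldl_cons, List.length_cons]
    have harith : i + ((rest.length : Int) + 1) = i + 1 + (rest.length : Int) := by ring
    push_cast
    rw [harith]
    cases s with
    | none =>
      cases b with
      | true =>
        show pvFinish _ ((PySem.List.enumerate rest (i+1)).foldl pvStepA (acc, some i)) = _
        rw [ih]
        simp only [pvCont, pvRuns_cons]
        simp
        constructor
        · ring
        · congr 1; ring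
      | false =>
        show pvFinish _ ((PySem.List.enumerate rest (i+1)).foldl pvStepA (acc, none)) = _
        rw [ih]
        simp [pvCont, pvRuns_false]
    | some s0 =>
      cases b with
      | true =>
        show pvFinish _ ((PySem.List.enumerate rest (i+1)).foldl pvStepA (acc, some s0)) = _
        rw [ih]
        simp only [pvCont, List.takeWhile, List.dropWhile]
        simp
        constructor
        · ring
        · congr 1; ring
      | false =>
        show pvFinish _ ((PySem.List.enumerate rest (i+1)).foldl pvStepA (acc ++ [(s0, i)], none)) = _
        rw [ih]
        simp [pvCont, pvRuns_false]

-- ===== VERDICT (by name: the statement is the Claim_ definition above) =====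
theorem find_stretches_spec : Claim_equal_find_stretches := by
  intro vs _
  show find_stretches vs = find_stretches_alt vs
  have h := pvMain vs 0 [] none
  simpa [pvFinish, pvCont, find_stretches, find_stretches_alt] using h
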